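-- pv_equiv track=rewrite | github.com/yoonsm0320/python | PCCE 기출10 공원.py | solution
-- ===== SOURCE A (Python) =====
-- def solution(mats, park):
--     rows=len(park)
--     cols=len(park[0])
--     mats.sort(reverse=True)
--     answer=0
--     for answer in mats:
--         for i in range(rows-answer+1):
--             for j in range(cols-answer+1):
--                 can_place=True
--                 for x in range(i,i+answer):
--                     for y in range(j,j+answer):
--                         if park[x][y]!="-1":
--                             can_place=False
--                             break
--                     if not can_place:
--                         break
--                 if can_place:
--                     return answer
--     return -1
-- ===== SOURCE B (Python) =====
-- def solution(mats, park):
--     # Largest all-empty square via the classic min-of-three DP (one pass over the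
--     # grid), then pick the largest mat that fits. Sorts mats in place like A.
--     cols = len(park[0])
--     best = 0
--     prev = [0] * cols
--     for row in park:
--         cur = []
--         left = 0        # value just computed in this row (cur[c-1]); 0 at c == 0
--         prev_left = 0   # prev[c-1]; 0 at c == 0
--         for cell, up in zip(row, prev):
--             v = min(up, left, prev_left) + 1 if cell == "-1" else 0
--             if v > best:
--                 best = v
--             cur.append(v)
--             left, prev_left = v, up
--         prev = cur
--     mats.sort(reverse=True)
--     for m in mats:
--         if m <= best:
--             return m
--     return -1
-- ===== Notes on version B (the rewrite author's own statement) =====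
-- stated objective: faster
-- what changed: A re-scans the whole k-by-k square for every mat size at every position (O(M*R*C*k^2)); B makes a single O(R*C) dynamic-programming pass computing the largest all-empty square side (min-of-three recurrence), then returns the first sorted mat not exceeding it.
-- outside the precondition, e.g. on solution([0], [['x', 'x'], ['-1']]): A returns 0, B returns 0
import Mathlib
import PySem

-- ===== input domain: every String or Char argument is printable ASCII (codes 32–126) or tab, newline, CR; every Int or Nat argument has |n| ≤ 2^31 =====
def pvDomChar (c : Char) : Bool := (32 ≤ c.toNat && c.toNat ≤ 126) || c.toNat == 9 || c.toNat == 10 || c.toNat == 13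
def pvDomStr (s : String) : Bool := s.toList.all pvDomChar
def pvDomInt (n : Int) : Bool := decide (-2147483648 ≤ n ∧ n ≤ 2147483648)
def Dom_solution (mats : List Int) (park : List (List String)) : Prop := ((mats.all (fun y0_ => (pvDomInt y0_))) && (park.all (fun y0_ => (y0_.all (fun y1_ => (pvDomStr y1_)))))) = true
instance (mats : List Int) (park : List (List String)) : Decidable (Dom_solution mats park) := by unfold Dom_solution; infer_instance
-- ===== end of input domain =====

-- B replaces A's per-mat brute-force square scan by one largest-empty-square DP pass over the grid;
-- both A and B sort `mats` in place (a caller-visible mutation); the theorems are about the return value.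

-- ===== PORT A =====
-- park[x][y]; every access A makes inside Pre_ is in range, so the defaults are never read
def pvCell (park : List (List String)) (x y : Int) : String :=
  PySem.List.pyGetD (PySem.List.pyGetD park x []) y ""

-- inner 'for y in range(j, j+answer)' loop with its break on a non-empty cell
def aInnerY (park : List (List String)) (x : Int) : List Int → Bool
  | [] => true
  | y :: ys => if pvCell park x y ≠ "-1" then false else aInnerY park x ys

-- 'for x in range(i, i+answer)' loop with its break on the cleared flag
def aInnerX (park : List (List String)) (j k : Int) : List Int → Bool
  | [] => true
  | x :: xs =>
    if aInnerY park x (PySem.List.pyRange j (j + k) 1) then aInnerX park j k xs else false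

-- 'for j in range(cols-answer+1)' with the early 'return answer' signalled as true
-- (Python's range is a lazy iterator, so the loop is ported as counting recursion)
def aLoopJ (park : List (List String)) (i k cols : Int) (j : Int) : Bool :=
  if h : j < cols - k + 1 then
    (if aInnerX park j k (PySem.List.pyRange i (i + k) 1) then true else aLoopJ park i k cols (j + 1))
  else false
termination_by (cols - k + 1 - j).toNat
decreasing_by omega

-- 'for i in range(rows-answer+1)', again as counting recursion over the lazy range
def aLoopI (park : List (List String)) (k cols rows : Int) (i : Int) : Bool :=
  if h : i < rows - k + 1 then
    (if aLoopJ park i k cols 0 then true else aLoopI park k cols rows (i + 1))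
  else false
termination_by (rows - k + 1 - i).toNat
decreasing_by omega

-- 'for answer in mats' on the descending-sorted list; 'return -1' when exhausted
def aLoopMats (park : List (List String)) (rows cols : Int) : List Int → Int
  | [] => -1
  | m :: ms =>
    if aLoopI park m cols rows 0 then m else aLoopMats park rows cols ms

def solution (mats : List Int) (park : List (List String)) : Int :=
  let rows : Int := (park.length : Int)
  let cols : Int := ((PySem.List.pyGetD park 0 []).length : Int)
  aLoopMats park rows cols (PySem.List.sorted mats (fun x => x) true)

-- ===== PORT B =====
-- inner 'for cell, up in zip(row, prev)' loop; returns (cur, best)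
def bRowGo : List (String × Int) → Int → Int → Int → List Int × Int
  | [], best, _, _ => ([], best)
  | (cell, up) :: rest, best, left, prevLeft =>
    let v := if cell = "-1" then min (min up left) prevLeft + 1 else 0
    let best' := if v > best then v else best
    let r := bRowGo rest best' v up
    (v :: r.1, r.2)

-- 'for row in park' loop carrying (prev, best)
def bRows : List (List String) → List Int → Int → Int
  | [], _, best => best
  | row :: rs, prev, best =>
    let r := bRowGo (row.zip prev) best 0 0
    bRows rs r.1 r.2

-- final 'for m in mats: if m <= best: return m' on the descending-sorted list
def bPick (best : Int) : List Int → Int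
  | [] => -1
  | m :: ms => if m ≤ best then m else bPick best ms

def solution_alt (mats : List Int) (park : List (List String)) : Int :=
  let cols : Nat := (PySem.List.pyGetD park 0 []).length
  let best := bRows park (List.replicate cols 0) 0
  bPick best (PySem.List.sorted mats (fun x => x) true)

-- ===== PRECONDITION & SPEC =====
-- Pre_ excludes the empty park (A raises IndexError on park[0]) and parks with a row shorter
-- than row 0 (A can raise IndexError reading park[x][y] there; on the few such parks where A
-- happens to return before reaching a short row both programs agree anyway).
def Pre_solution (mats : List Int) (park : List (List String)) : Prop :=
  park ≠ [] ∧ ∀ row ∈ park, park.headI.length ≤ row.length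

instance (mats : List Int) (park : List (List String)) : Decidable (Pre_solution mats park) := by
  unfold Pre_solution; infer_instance

def pvWitness_solution : List Int × List (List String) :=
  ([2, 3], [["-1", "-1", "0"], ["-1", "-1", "x"]])

def Spec_solution (mats : List Int) (park : List (List String)) (out : Int) : Prop := out = solution_alt mats park
instance (mats : List Int) (park : List (List String)) (out : Int) : Decidable (Spec_solution mats park out) := by unfold Spec_solution; infer_instance

-- ===== CLAIM (what is proved, stated in full; the proofs are below) =====
def Claim_equal_solution : Prop := ∀ (mats : List Int) (park : List (List String)), Dom_solution mats park → Pre_solution mats park → Spec_solution mats park (solution mats park)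

-- ===== LEMMAS AND PROOFS =====

def cellN (park : List (List String)) (r c : Nat) : String := (park.getD r []).getD c ""
def empN (park : List (List String)) (r c : Nat) : Bool := cellN park r c == "-1"
def G (park : List (List String)) : Nat → Nat → Int
  | 0, c => if empN park 0 c then 1 else 0
  | r+1, 0 => if empN park (r+1) 0 then 1 else 0
  | r+1, c+1 =>
    if empN park (r+1) (c+1) then
      min (min (G park r (c+1)) (G park (r+1) c)) (G park r c) + 1
    else 0
termination_by r c => (r, c)

lemma G_nonneg (park : List (List String)) (r c : Nat) : 0 ≤ G park r c := by
  induction r, c using G.induct park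
  all_goals rw [G]
  all_goals split <;> first | omega | simp_all

def SqEmp (park : List (List String)) (r c k : Nat) : Prop :=
  k ≤ r + 1 ∧ k ≤ c + 1 ∧ ∀ a < k, ∀ b < k, empN park (r - a) (c - b) = true

lemma SqEmp_succ (park : List (List String)) (r c k : Nat) :
    SqEmp park (r+1) (c+1) (k+1) ↔
      empN park (r+1) (c+1) = true ∧ SqEmp park r (c+1) k ∧ SqEmp park (r+1) c k ∧ SqEmp park r c k := by
  unfold SqEmp
  constructor
  · rintro ⟨h1, h2, h3⟩
    refine ⟨h3 0 (by omega) 0 (by omega), ⟨by omega, by omega, ?_⟩, ⟨by omega, by omega, ?_⟩, ⟨by omega, by omega, ?_⟩⟩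
    · intro a ha b hb
      have := h3 (a+1) (by omega) b (by omega)
      convert this using 2 <;> omega
    · intro a ha b hb
      have := h3 a (by omega) (b+1) (by omega)
      convert this using 2 <;> omega
    · intro a ha b hb
      have := h3 (a+1) (by omega) (b+1) (by omega)
      convert this using 2 <;> omega
  · rintro ⟨h0, ⟨_, _, hu⟩, ⟨_, _, hl⟩, ⟨_, _, hd⟩⟩
    refine ⟨by omega, by omega, ?_⟩
    intro a ha b hb
    rcases Nat.eq_zero_or_pos a with rfl | hA
    · rcases Nat.eq_zero_or_pos b with rfl | hB
      · simpa using h0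
      · have := hl 0 (by omega) (b-1) (by omega)
        convert this using 2 <;> omega
    · rcases Nat.eq_zero_or_pos b with rfl | hB
      · have := hu (a-1) (by omega) 0 (by omega)
        convert this using 2 <;> omega
      · have := hd (a-1) (by omega) (b-1) (by omega)
        convert this using 2 <;> omega

lemma SqEmp_zero (park : List (List String)) (r c : Nat) : SqEmp park r c 0 :=
  ⟨Nat.zero_le _, Nat.zero_le _, fun a ha => absurd ha (Nat.not_lt_zero a)⟩

lemma SqEmp_base_r (park : List (List String)) (c k : Nat) :
    SqEmp park 0 c k ↔ k = 0 ∨ (k = 1 ∧ empN park 0 c = true) := by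
  constructor
  · rintro ⟨h1, h2, h3⟩
    interval_cases k
    · exact Or.inl rfl
    · exact Or.inr ⟨rfl, by simpa using h3 0 (by omega) 0 (by omega)⟩
  · rintro (rfl | ⟨rfl, he⟩)
    · exact SqEmp_zero park 0 c
    · refine ⟨by omega, by omega, ?_⟩
      intro a ha b hb
      have ha0 : a = 0 := by omega
      have hb0 : b = 0 := by omega
      subst ha0; subst hb0; simpa using he

lemma SqEmp_base_c (park : List (List String)) (r k : Nat) :
    SqEmp park r 0 k ↔ k = 0 ∨ (k = 1 ∧ empN park r 0 = true) := by
  constructor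
  · rintro ⟨h1, h2, h3⟩
    interval_cases k
    · exact Or.inl rfl
    · exact Or.inr ⟨rfl, by simpa using h3 0 (by omega) 0 (by omega)⟩
  · rintro (rfl | ⟨rfl, he⟩)
    · exact SqEmp_zero park r 0
    · refine ⟨by omega, by omega, ?_⟩
      intro a ha b hb
      have ha0 : a = 0 := by omega
      have hb0 : b = 0 := by omega
      subst ha0; subst hb0; simpa using he

lemma G_char (park : List (List String)) : ∀ (r c k : Nat), (k : Int) ≤ G park r c ↔ SqEmp park r c k := by
  intro r c
  induction r, c using G.induct park with
  | case1 c h => intro k; rw [G, if_pos h, SqEmp_base_r]; simp [h]; omega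
  | case2 c h => intro k; rw [G, if_neg h, SqEmp_base_r]; simp [h]
  | case3 r h => intro k; rw [G, if_pos h, SqEmp_base_c]; simp [h]; omega
  | case4 r h => intro k; rw [G, if_neg h, SqEmp_base_c]; simp [h]
  | case5 r c h ih3 ih2 ih1 =>
    intro k
    rw [G, if_pos h]
    match k with
    | 0 =>
      have h1 := G_nonneg park r (c+1); have h2 := G_nonneg park (r+1) c
      have h3 := G_nonneg park r c
      simp only [Nat.cast_zero]
      exact ⟨fun _ => SqEmp_zero park (r+1) (c+1), fun _ => by omega⟩
    | k+1 =>
      rw [SqEmp_succ, ← ih3, ← ih2, ← ih1]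
      push_cast
      constructor
      · intro hk; exact ⟨h, by omega, by omega, by omega⟩
      · rintro ⟨-, h1, h2, h3⟩; omega
  | case6 r c h =>
    intro k
    rw [G, if_neg h]
    match k with
    | 0 => simp [SqEmp_zero]
    | k+1 =>
      constructor
      · intro hk; exfalso; push_cast at hk; omega
      · intro hs; rw [SqEmp_succ] at hs; exact absurd hs.1 h

def U (park : List (List String)) (r c : Nat) : Int :=
  if r = 0 then 0 else G park (r - 1) c

def bestVal (park : List (List String)) (rows w : Nat) : Int :=
  (List.range rows).foldl (fun b r => ((List.range w).map (G park r)).foldl max b) 0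

lemma U_zero (park : List (List String)) (c : Nat) : U park 0 c = 0 := by unfold U; simp

lemma U_succ (park : List (List String)) (s c : Nat) : U park (s+1) c = G park s c := by unfold U; simp

lemma cellVal (park : List (List String)) (r c₀ : Nat) (left prevLeft : Int)
    (hl : left = if c₀ = 0 then 0 else G park r (c₀ - 1))
    (hp : prevLeft = if c₀ = 0 then 0 else U park r (c₀ - 1)) :
    (if cellN park r c₀ = "-1" then min (min (U park r c₀) left) prevLeft + 1 else 0) = G park r c₀ := by
  have hemp : (cellN park r c₀ = "-1") ↔ empN park r c₀ = true := by unfold empN; simp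
  by_cases hc : empN park r c₀ = true
  · rw [if_pos (hemp.mpr hc)]
    match r, c₀ with
    | 0, 0 =>
      simp only [reduceIte] at hl hp
      subst hl hp
      conv_rhs => rw [G]
      rw [if_pos hc, U_zero]
      simp
    | 0, t+1 =>
      simp only [if_neg (Nat.succ_ne_zero t), Nat.add_sub_cancel] at hl hp
      subst hl hp
      conv_rhs => rw [G]
      rw [if_pos hc, U_zero, U_zero]
      have := G_nonneg park 0 t
      omega
    | s+1, 0 =>
      simp only [reduceIte] at hl hp
      subst hl hp
      conv_rhs => rw [G]
      rw [if_pos hc, U_succ]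
      have := G_nonneg park s 0
      omega
    | s+1, t+1 =>
      simp only [if_neg (Nat.succ_ne_zero t), Nat.add_sub_cancel] at hl hp
      subst hl hp
      rw [U_succ, U_succ]
      conv_rhs => rw [G]
      rw [if_pos hc]
  · rw [if_neg (fun h => hc (hemp.mp h))]
    match r, c₀ with
    | 0, c₀ => conv_rhs => rw [G, if_neg hc]
    | s+1, 0 => conv_rhs => rw [G, if_neg hc]
    | s+1, t+1 => conv_rhs => rw [G, if_neg hc]

lemma max_ite (v best : Int) : (if v > best then v else best) = max best v := by
  rw [max_def]; split <;> split <;> omega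

lemma bRowGo_spec (park : List (List String)) (r : Nat) :
    ∀ (n c₀ : Nat) (best left prevLeft : Int),
      left = (if c₀ = 0 then 0 else G park r (c₀ - 1)) →
      prevLeft = (if c₀ = 0 then 0 else U park r (c₀ - 1)) →
      bRowGo ((List.range' c₀ n).map (fun c => (cellN park r c, U park r c))) best left prevLeft
        = ((List.range' c₀ n).map (G park r),
           ((List.range' c₀ n).map (G park r)).foldl max best) := by
  intro n
  induction n with
  | zero => intro c₀ best left prevLeft _ _; simp [bRowGo]
  | succ n ih =>
    intro c₀ best left prevLeft hl hp
    rw [List.range'_succ]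
    simp only [List.map_cons, List.foldl_cons]
    simp only [bRowGo]
    rw [cellVal park r c₀ left prevLeft hl hp]
    rw [ih (c₀+1) (if G park r c₀ > best then G park r c₀ else best) (G park r c₀) (U park r c₀)
        (by simp) (by simp)]
    rw [max_ite]

lemma zip_row_eq (park : List (List String)) (r w : Nat)
    (hw : w ≤ (park.getD r []).length) :
    (park.getD r []).zip ((List.range w).map (U park r))
      = (List.range w).map (fun c => (cellN park r c, U park r c)) := by
  apply List.ext_getElem
  · simp only [List.length_zip, List.length_map, List.length_range]; omega
  · intro i h1 h2
    simp only [List.length_zip, List.length_map, List.length_range] at h1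
    have hi : i < w := by omega
    rw [List.getElem_zip]
    simp only [List.getElem_map, List.getElem_range]
    unfold cellN
    congr 1
    exact (List.getD_eq_getElem _ _ (by omega)).symm

lemma bRows_spec (park : List (List String)) (w : Nat)
    (hrect : ∀ row ∈ park, w ≤ row.length) :
    ∀ (n t : Nat) (B : Int), n = park.length - t →
      bRows (park.drop t) ((List.range w).map (U park t)) B
        = (List.range' t n).foldl
            (fun b r => ((List.range w).map (G park r)).foldl max b) B := by
  intro n
  induction n with
  | zero =>
    intro t B h
    have hd : park.drop t = [] := List.drop_eq_nil_iff.mpr (by omega)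
    rw [hd]
    simp [bRows]
  | succ n ih =>
    intro t B h
    have ht : t < park.length := by omega
    have hdrop : park.drop t = park[t] :: park.drop (t+1) := List.drop_eq_getElem_cons ht
    have hget : park.getD t [] = park[t] := by
      rw [List.getD_eq_getElem?_getD, List.getElem?_eq_getElem ht]; rfl
    rw [hdrop]
    simp only [bRows]
    rw [← hget, zip_row_eq park t w (by rw [hget]; exact hrect _ (List.getElem_mem ht))]
    rw [List.range_eq_range']
    rw [bRowGo_spec park t w 0 B 0 0 (by simp) (by simp)]
    rw [List.range'_succ, List.foldl_cons]
    rw [← List.range_eq_range']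
    have hnext : (List.range w).map (G park t) = (List.range w).map (U park (t+1)) := by
      apply List.map_congr_left; intro c _; rw [U_succ]
    rw [hnext]
    exact ih (t+1) _ (by omega)

lemma le_foldl_max_iff (l : List Int) (init m : Int) :
    m ≤ l.foldl max init ↔ m ≤ init ∨ ∃ x ∈ l, m ≤ x := by
  induction l generalizing init with
  | nil => simp
  | cons x xs ih =>
    rw [List.foldl_cons, ih]
    simp only [List.mem_cons]
    constructor
    · rintro (h | ⟨y, hy, hm⟩)
      · rcases le_max_iff.mp h with h | h
        · exact Or.inl h
        · exact Or.inr ⟨x, Or.inl rfl, h⟩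
      · exact Or.inr ⟨y, Or.inr hy, hm⟩
    · rintro (h | ⟨y, rfl | hy, hm⟩)
      · exact Or.inl (le_max_iff.mpr (Or.inl h))
      · exact Or.inl (le_max_iff.mpr (Or.inr hm))
      · exact Or.inr ⟨y, hy, hm⟩

lemma bestVal_nonneg (park : List (List String)) (rows w : Nat) : 0 ≤ bestVal park rows w := by
  unfold bestVal
  induction rows with
  | zero => simp
  | succ n ih =>
    rw [List.range_succ, List.foldl_append, List.foldl_cons, List.foldl_nil]
    calc (0:Int) ≤ _ := ih
    _ ≤ _ := (PySem.List.le_foldl_max _ _).1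

lemma le_bestVal_iff (park : List (List String)) (rows w : Nat) (m : Int) (hm : 1 ≤ m) :
    m ≤ bestVal park rows w ↔ ∃ r < rows, ∃ c < w, m ≤ G park r c := by
  unfold bestVal
  induction rows with
  | zero => simp; omega
  | succ n ih =>
    rw [List.range_succ, List.foldl_append, List.foldl_cons, List.foldl_nil,
        le_foldl_max_iff, ih]
    constructor
    · rintro (⟨r, hr, hc⟩ | ⟨x, hx, hmx⟩)
      · exact ⟨r, by omega, hc⟩
      · rcases List.mem_map.mp hx with ⟨c, hc, rfl⟩
        exact ⟨n, by omega, c, List.mem_range.mp hc, hmx⟩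
    · rintro ⟨r, hr, c, hc, hmg⟩
      rcases Nat.lt_succ_iff_lt_or_eq.mp hr with h | rfl
      · exact Or.inl ⟨r, h, c, hc, hmg⟩
      · exact Or.inr ⟨G park r c, List.mem_map.mpr ⟨c, List.mem_range.mpr hc, rfl⟩, hmg⟩

lemma pvCell_eq (park : List (List String)) (x y : Int) (hx : 0 ≤ x) (hy : 0 ≤ y) :
    pvCell park x y = cellN park x.toNat y.toNat := by
  unfold pvCell cellN
  obtain ⟨n, rfl⟩ := Int.eq_ofNat_of_zero_le hx
  obtain ⟨p, rfl⟩ := Int.eq_ofNat_of_zero_le hy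
  simp [PySem.List.pyGetD_natCast]

lemma aInnerY_iff (park : List (List String)) (x : Int) (ys : List Int) :
    aInnerY park x ys = true ↔ ∀ y ∈ ys, pvCell park x y = "-1" := by
  induction ys with
  | nil => simp [aInnerY]
  | cons y ys ih =>
    rw [aInnerY]
    by_cases h : pvCell park x y = "-1" <;> simp [h, ih]

lemma aInnerX_iff (park : List (List String)) (j k : Int) (xs : List Int) :
    aInnerX park j k xs = true ↔ ∀ x ∈ xs, aInnerY park x (PySem.List.pyRange j (j + k) 1) = true := by
  induction xs with
  | nil => simp [aInnerX]
  | cons x xs ih =>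
    rw [aInnerX]
    by_cases h : aInnerY park x (PySem.List.pyRange j (j + k) 1) = true <;> simp [h, ih]

-- list-based renderings of the two counting loops, used only by the proofs
def aLoopJL (park : List (List String)) (i k : Int) : List Int → Bool
  | [] => false
  | j :: js =>
    if aInnerX park j k (PySem.List.pyRange i (i + k) 1) then true else aLoopJL park i k js

def aLoopIL (park : List (List String)) (k cols : Int) : List Int → Bool
  | [] => false
  | i :: is =>
    if aLoopJL park i k (PySem.List.pyRange 0 (cols - k + 1) 1) then true else aLoopIL park k cols is

lemma aLoopJ_eq (park : List (List String)) (i k cols : Int) :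
    ∀ (n : Nat) (j : Int), n = (cols - k + 1 - j).toNat →
      aLoopJ park i k cols j = aLoopJL park i k (PySem.List.pyRange j (cols - k + 1) 1) := by
  intro n
  induction n with
  | zero =>
    intro j h
    rw [aLoopJ, dif_neg (by omega : ¬ (j < cols - k + 1)),
        PySem.List.pyRange_one_eq_nil (by omega : cols - k + 1 ≤ j), aLoopJL]
  | succ n ih =>
    intro j h
    rw [aLoopJ, dif_pos (by omega : j < cols - k + 1),
        PySem.List.pyRange_one_cons (by omega : j < cols - k + 1), aLoopJL,
        ih (j + 1) (by omega)]

lemma aLoopI_eq (park : List (List String)) (k cols rows : Int) :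
    ∀ (n : Nat) (i : Int), n = (rows - k + 1 - i).toNat →
      aLoopI park k cols rows i = aLoopIL park k cols (PySem.List.pyRange i (rows - k + 1) 1) := by
  intro n
  induction n with
  | zero =>
    intro i h
    rw [aLoopI, dif_neg (by omega : ¬ (i < rows - k + 1)),
        PySem.List.pyRange_one_eq_nil (by omega : rows - k + 1 ≤ i), aLoopIL]
  | succ n ih =>
    intro i h
    rw [aLoopI, dif_pos (by omega : i < rows - k + 1),
        PySem.List.pyRange_one_cons (by omega : i < rows - k + 1), aLoopIL,
        ih (i + 1) (by omega), aLoopJ_eq park i k cols (cols - k + 1 - 0).toNat 0 (by omega)]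

lemma aLoopJL_iff (park : List (List String)) (i k : Int) (js : List Int) :
    aLoopJL park i k js = true ↔ ∃ j ∈ js, aInnerX park j k (PySem.List.pyRange i (i + k) 1) = true := by
  induction js with
  | nil => simp [aLoopJL]
  | cons j js ih =>
    rw [aLoopJL]
    by_cases h : aInnerX park j k (PySem.List.pyRange i (i + k) 1) = true <;> simp [h, ih]

lemma aLoopIL_iff (park : List (List String)) (k cols : Int) (is : List Int) :
    aLoopIL park k cols is = true ↔ ∃ i ∈ is, aLoopJL park i k (PySem.List.pyRange 0 (cols - k + 1) 1) = true := by
  induction is with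
  | nil => simp [aLoopIL]
  | cons i is ih =>
    rw [aLoopIL]
    by_cases h : aLoopJL park i k (PySem.List.pyRange 0 (cols - k + 1) 1) = true <;> simp [h, ih]

lemma scan_iff_le_best (park : List (List String)) (hne : park ≠ [])
    (hrect : ∀ row ∈ park, park.headI.length ≤ row.length) (m : Int) :
    (aLoopIL park m ((park.headI.length : Nat) : Int)
        (PySem.List.pyRange 0 (((park.length : Nat) : Int) - m + 1) 1) = true)
      ↔ m ≤ bestVal park park.length park.headI.length := by
  set R : Nat := park.length with hR
  set w : Nat := park.headI.length with hw
  have hR1 : 1 ≤ R := by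
    cases park with
    | nil => exact absurd rfl hne
    | cons h t => simp [hR]
  by_cases hm : m ≤ 0
  · constructor
    · intro _; exact le_trans hm (bestVal_nonneg park R w)
    · intro _
      rw [aLoopIL_iff]
      refine ⟨0, ?_, ?_⟩
      · rw [PySem.List.mem_pyRange_one]; omega
      · rw [aLoopJL_iff]
        refine ⟨0, ?_, ?_⟩
        · rw [PySem.List.mem_pyRange_one]; omega
        · rw [aInnerX_iff]
          intro x hx
          rw [PySem.List.mem_pyRange_one] at hx
          omega
  · push_neg at hm
    have hm1 : 1 ≤ m := hm
    set k : Nat := m.toNat with hk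
    have hkm : (k : Int) = m := by omega
    rw [aLoopIL_iff]
    simp only [aLoopJL_iff, aInnerX_iff, aInnerY_iff]
    rw [le_bestVal_iff park R w m hm1]
    constructor
    · rintro ⟨i, hi, j, hj, hall⟩
      rw [PySem.List.mem_pyRange_one] at hi hj
      refine ⟨(i + m - 1).toNat, by omega, (j + m - 1).toNat, by omega, ?_⟩
      rw [← hkm, G_char]
      refine ⟨by omega, by omega, ?_⟩
      intro a ha b hb
      have hx := hall (i + m - 1 - a) (by rw [PySem.List.mem_pyRange_one]; omega)
        (j + m - 1 - b) (by rw [PySem.List.mem_pyRange_one]; omega)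
      rw [pvCell_eq park _ _ (by omega) (by omega)] at hx
      have e1 : (i + m - 1 - (a:Int)).toNat = (i + m - 1).toNat - a := by omega
      have e2 : (j + m - 1 - (b:Int)).toNat = (j + m - 1).toNat - b := by omega
      rw [e1, e2] at hx
      rw [← hkm] at hx
      unfold empN
      rw [hx]
      simp
    · rintro ⟨r, hr, c, hc, hg⟩
      rw [← hkm, G_char] at hg
      obtain ⟨hbr, hbc, hcells⟩ := hg
      refine ⟨((r + 1 - k : Nat) : Int), ?_, ((c + 1 - k : Nat) : Int), ?_, ?_⟩
      · rw [PySem.List.mem_pyRange_one]; omega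
      · rw [PySem.List.mem_pyRange_one]; omega
      · intro x hx y hy
        rw [PySem.List.mem_pyRange_one] at hx hy
        rw [pvCell_eq park x y (by omega) (by omega)]
        have ha : r - x.toNat < k := by omega
        have hb : c - y.toNat < k := by omega
        have := hcells (r - x.toNat) ha (c - y.toNat) hb
        have e1 : r - (r - x.toNat) = x.toNat := by omega
        have e2 : c - (c - y.toNat) = y.toNat := by omega
        rw [e1, e2] at this
        unfold empN at this
        simpa using this

lemma loops_eq (park : List (List String)) (rows cols best : Int)
    (h : ∀ m : Int, (aLoopI park m cols rows 0 = true) ↔ m ≤ best) :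
    ∀ l : List Int, aLoopMats park rows cols l = bPick best l := by
  intro l
  induction l with
  | nil => rfl
  | cons m ms ih =>
    rw [aLoopMats, bPick]
    by_cases hm : m ≤ best
    · rw [if_pos ((h m).mpr hm), if_pos hm]
    · rw [if_neg (fun hh => hm ((h m).mp hh)), if_neg hm, ih]

lemma best_eq (park : List (List String)) (hrect : ∀ row ∈ park, park.headI.length ≤ row.length) :
    bRows park (List.replicate park.headI.length 0) 0
      = bestVal park park.length park.headI.length := by
  have h0 : (List.range park.headI.length).map (U park 0) = List.replicate park.headI.length 0 := by
    rw [List.eq_replicate_iff]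
    constructor
    · simp
    · intro b hb
      rcases List.mem_map.mp hb with ⟨c, _, rfl⟩
      exact U_zero park c
  have := bRows_spec park park.headI.length hrect park.length 0 0 (by omega)
  rw [List.drop_zero, h0] at this
  rw [this]
  unfold bestVal
  rw [show List.range park.length = List.range' 0 park.length from List.range_eq_range']

-- ===== VERDICT (by name: the statement is the Claim_ definition above) =====
theorem solution_spec : Claim_equal_solution := by
  intro mats park _ hpre
  obtain ⟨hne, hrect⟩ := hpre
  unfold Spec_solution solution solution_alt
  have hhead : PySem.List.pyGetD park 0 ([] : List String) = park.headI := by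
    cases park with
    | nil => exact absurd rfl hne
    | cons h t => rw [PySem.List.pyGetD_zero]; rfl
  simp only [hhead]
  rw [best_eq park hrect]
  apply loops_eq
  intro m
  rw [aLoopI_eq park m (park.headI.length : Int) (park.length : Int)
      ((park.length : Int) - m + 1 - 0).toNat 0 (by omega)]
  rw [scan_iff_le_best park hne hrect m]
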